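-- pv_equiv track=rewrite | github.com/CIRWEL/unitares | src/mcp_handlers/identity_v2.py | _extract_stable_identifier
-- ===== SOURCE A (Python) =====
-- from typing import Optional, Dict, Any
--
-- def _extract_stable_identifier(session_key: str) -> Optional[str]:
--     """
--     Extract stable identifier from session key for recovery across server restarts.
--
--     For client_session_id format "IP:port:suffix", extracts the suffix.
--     This allows recovery even when IP changes.
--
--     Args:
--         session_key: Full session key (e.g., "217.216.112.229:8767:6d79c4")
--
--     Returns:
--         Stable identifier (e.g., "6d79c4") or None if not extractable
--     """
--     if not session_key:
--         return None
--
--     # Pattern: IP:port:suffix or IP:suffix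
--     parts = session_key.split(":")
--     if len(parts) >= 2:
--         # Take the last part as stable identifier
--         suffix = parts[-1]
--         # Validate it looks like a fingerprint (hex, reasonable length)
--         if len(suffix) >= 4 and all(c in '0123456789abcdef' for c in suffix.lower()):
--             return suffix
--
--     return None
-- ===== SOURCE B (Python) =====
-- import re
--
-- # One compiled regex does the whole job: with DOTALL the greedy '.*' swallows
-- # everything through the last ':' and the group must be >=4 hex chars to the end.
-- _STABLE_ID_RE = re.compile(r'.*:([0-9a-fA-F]{4,})', re.DOTALL)
--
-- def _extract_stable_identifier(session_key: str):
--     m = _STABLE_ID_RE.fullmatch(session_key)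
--     return m.group(1) if m else None
-- ===== Notes on version B (the rewrite author's own statement) =====
-- stated objective: idiomatic
-- what changed: A splits the key into all colon-separated parts and validates the last part by lowercasing it and scanning a lowercase-hex alphabet; B instead matches the whole key against one compiled regex fullmatch (a greedy dot-star, a colon, then a captured group of at least four hex characters of either case, with DOTALL) and returns the captured group.
import Mathlib
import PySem

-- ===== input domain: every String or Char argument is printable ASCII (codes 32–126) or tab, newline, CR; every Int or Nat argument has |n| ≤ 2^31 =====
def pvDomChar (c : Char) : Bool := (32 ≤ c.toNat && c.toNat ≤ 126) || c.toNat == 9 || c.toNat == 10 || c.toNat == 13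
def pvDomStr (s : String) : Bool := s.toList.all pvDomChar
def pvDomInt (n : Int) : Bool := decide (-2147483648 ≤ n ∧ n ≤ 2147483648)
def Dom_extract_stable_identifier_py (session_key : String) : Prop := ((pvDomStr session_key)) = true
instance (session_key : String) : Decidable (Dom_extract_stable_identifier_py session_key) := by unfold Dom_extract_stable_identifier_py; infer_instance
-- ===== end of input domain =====

-- B replaces A's split-into-parts + lowercase-and-scan validation by a single regex
-- fullmatch (r'.*:([0-9a-fA-F]{4,})' with DOTALL), ported as the engine's backtracking
-- scan for the split point; objective: idiomatic.

-- ===== PORT A =====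
def extract_stable_identifier_py (session_key : String) : Option String :=
  if session_key = "" then none
  else
    -- parts = session_key.split(":")  (separator ":" is nonempty, so split? is some)
    match PySem.Str.split? session_key ":" with
    | none => none
    | some parts =>
      if 2 ≤ parts.length then
        -- suffix = parts[-1]  (parts is nonempty, so pyGet? is some)
        match PySem.List.pyGet? parts (-1) with
        | none => none
        | some suffix =>
          if 4 ≤ PySem.Str.len suffix ∧
              (PySem.Str.lower suffix).toList.all
                (fun c => PySem.Chars.isIn [c] "0123456789abcdef".toList)
          then some suffix else none
      else none

-- ===== PORT B =====
-- the character class [0-9a-fA-F]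
def pvHexClass (c : Char) : Bool :=
  (decide ('0' ≤ c) && decide (c ≤ '9')) || (decide ('a' ≤ c) && decide (c ≤ 'f')) ||
  (decide ('A' ≤ c) && decide (c ≤ 'F'))

-- Hand port (exact) of re.fullmatch(r'.*:([0-9a-fA-F]{4,})', s, re.DOTALL): the greedy
-- '.*' (DOTALL: '.' matches every character) backtracks from the end, trying to place
-- ':' at positions n-1, n-2, …, 0; the group is the remainder, which must be ≥ 4
-- characters of the class reaching the end of the string (fullmatch).
def pvTry (cs : List Char) : Nat → Option String
  | 0 => none
  | n + 1 =>
    if cs[n]? = some ':' ∧ 4 ≤ (cs.drop (n + 1)).length ∧ (cs.drop (n + 1)).all pvHexClass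
    then some (String.ofList (cs.drop (n + 1)))
    else pvTry cs n

def extract_stable_identifier_py_alt (session_key : String) : Option String :=
  pvTry session_key.toList session_key.toList.length

-- ===== PRECONDITION & SPEC =====
def Spec_extract_stable_identifier_py (session_key : String) (out : Option String) : Prop := out = extract_stable_identifier_py_alt session_key
instance (session_key : String) (out : Option String) : Decidable (Spec_extract_stable_identifier_py session_key out) := by unfold Spec_extract_stable_identifier_py; infer_instance

-- ===== CLAIM (what is proved, stated in full; the proofs are below) =====
def Claim_equal_extract_stable_identifier_py : Prop := ∀ (session_key : String), Dom_extract_stable_identifier_py session_key → Spec_extract_stable_identifier_py session_key (extract_stable_identifier_py session_key)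

-- ===== LEMMAS AND PROOFS =====

-- characters: comparisons and equality seen through toNat
lemma pv_chle (a b : Char) : (a ≤ b) ↔ a.toNat ≤ b.toNat := by
  rw [Char.le_def, UInt32.le_iff_toNat_le]; exact Iff.rfl

lemma pv_cheq (a b : Char) : (a = b) ↔ a.toNat = b.toNat := by
  constructor
  · exact fun h => congrArg _ h
  · intro h; apply Char.ext; exact UInt32.toNat_inj.mp h

-- A's per-character test (lowercase then membership) agrees with B's character class
lemma pv_hex_char (c : Char) :
    ("0123456789abcdef".toList).contains (PySem.Chars.lowerChar c) = pvHexClass c := by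
  have hlist : "0123456789abcdef".toList
      = ['0','1','2','3','4','5','6','7','8','9','a','b','c','d','e','f'] := rfl
  rw [hlist, Bool.eq_iff_iff]
  unfold PySem.Chars.lowerChar PySem.Chars.isupper pvHexClass
  by_cases h : ('A' ≤ c ∧ c ≤ 'Z')
  · have h1 : 65 ≤ c.toNat := (pv_chle _ c).1 h.1
    have h2 : c.toNat ≤ 90 := (pv_chle c _).1 h.2
    have ht : (Char.ofNat (c.toNat + 32)).toNat = c.toNat + 32 := by
      rw [Char.toNat_ofNat, if_pos (by constructor; omega)]
    simp only [h.1, h.2, decide_true, Bool.and_self, ite_true, List.contains,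
      List.elem_eq_mem, List.mem_cons, List.not_mem_nil, or_false, decide_eq_true_eq,
      pv_cheq, ht, pv_chle, true_and, Bool.or_eq_true, Bool.and_eq_true, show ('0'.toNat = 48) from rfl, show ('1'.toNat = 49) from rfl, show ('2'.toNat = 50) from rfl, show ('3'.toNat = 51) from rfl, show ('4'.toNat = 52) from rfl, show ('5'.toNat = 53) from rfl, show ('6'.toNat = 54) from rfl, show ('7'.toNat = 55) from rfl, show ('8'.toNat = 56) from rfl, show ('9'.toNat = 57) from rfl, show ('a'.toNat = 97) from rfl, show ('b'.toNat = 98) from rfl, show ('c'.toNat = 99) from rfl, show ('d'.toNat = 100) from rfl, show ('e'.toNat = 101) from rfl, show ('f'.toNat = 102) from rfl, show ('A'.toNat = 65) from rfl, show ('B'.toNat = 66) from rfl, show ('C'.toNat = 67) from rfl, show ('D'.toNat = 68) from rfl, show ('E'.toNat = 69) from rfl, show ('F'.toNat = 70) from rfl, show ('Z'.toNat = 90) from rfl]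
    omega
  · have hne : ¬ (decide ('A' ≤ c) && decide (c ≤ 'Z')) = true := by
      simpa [Decidable.not_and_iff_not_or_not] using h
    rw [if_neg hne]
    simp only [List.contains, List.elem_eq_mem, List.mem_cons, List.not_mem_nil, or_false,
      decide_eq_true_eq, pv_cheq, pv_chle, true_and, Bool.or_eq_true, Bool.and_eq_true, show ('0'.toNat = 48) from rfl, show ('1'.toNat = 49) from rfl, show ('2'.toNat = 50) from rfl, show ('3'.toNat = 51) from rfl, show ('4'.toNat = 52) from rfl, show ('5'.toNat = 53) from rfl, show ('6'.toNat = 54) from rfl, show ('7'.toNat = 55) from rfl, show ('8'.toNat = 56) from rfl, show ('9'.toNat = 57) from rfl, show ('a'.toNat = 97) from rfl, show ('b'.toNat = 98) from rfl, show ('c'.toNat = 99) from rfl, show ('d'.toNat = 100) from rfl, show ('e'.toNat = 101) from rfl, show ('f'.toNat = 102) from rfl, show ('A'.toNat = 65) from rfl, show ('B'.toNat = 66) from rfl, show ('C'.toNat = 67) from rfl, show ('D'.toNat = 68) from rfl, show ('E'.toNat = 69) from rfl, show ('F'.toNat = 70) from rfl, show ('Z'.toNat = 90) from rfl]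
    have h3 : ¬ (65 ≤ c.toNat ∧ c.toNat ≤ 90) := by
      intro hx; exact h ⟨(pv_chle _ c).2 hx.1, (pv_chle c _).2 hx.2⟩
    omega

lemma pv_isIn_single (x : Char) (l : List Char) : PySem.Chars.isIn [x] l = l.contains x := by
  by_cases h : x ∈ l
  · rw [(PySem.Chars.isIn_iff_infix [x] l).2 ((List.singleton_infix_iff x l).2 h)]
    simp [h]
  · rw [(PySem.Chars.isIn_eq_false_iff [x] l).2 (by simpa [List.singleton_infix_iff] using h)]
    simp [h]

-- a simple structural model of str.split(":")
def pvSplit : List Char → List (List Char)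
  | [] => [[]]
  | c :: r => if c = ':' then [] :: pvSplit r else (pvSplit r).modifyHead (c :: ·)

lemma pvSplit_ne_nil (cs : List Char) : pvSplit cs ≠ [] := by
  cases cs with
  | nil => simp [pvSplit]
  | cons c r =>
    simp only [pvSplit]
    split
    · simp
    · cases h : pvSplit r with
      | nil => exact absurd h (pvSplit_ne_nil r)
      | cons p ps => simp [List.modifyHead]

lemma pv_go_eq (fuel : Nat) (l : List Char) (cur : List Char) (acc : List (List Char))
    (hf : l.length ≤ fuel) :
    PySem.Chars.splitOn.go [':'] fuel l cur acc
      = acc.reverse ++ (cur.reverse ++ (pvSplit l).headI) :: (pvSplit l).tail := by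
  induction fuel generalizing l cur acc with
  | zero =>
    have hl : l = [] := List.length_eq_zero_iff.mp (Nat.le_zero.mp hf)
    subst hl
    rw [PySem.Chars.splitOn.go]
    simp [pvSplit]
  | succ f ih =>
    cases l with
    | nil =>
      rw [PySem.Chars.splitOn.go]
      all_goals first
      | omega
      | simp [pvSplit]
    | cons c r =>
      rw [PySem.Chars.splitOn.go]
      by_cases hc : c = ':'
      · subst hc
        have hpre : List.isPrefixOf [':'] (':' :: r) = true := by simp [List.isPrefixOf]
        rw [if_pos hpre]
        simp only [List.length_cons] at hf
        have hd : List.drop [':'].length (':' :: r) = r := rfl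
        rw [hd, ih r [] (List.reverse cur :: acc) (by omega)]
        cases hr2 : pvSplit r with
        | nil => exact absurd hr2 (pvSplit_ne_nil r)
        | cons p ps => simp [pvSplit, hr2]
      · have hpre : List.isPrefixOf [':'] (c :: r) = false := by
          simp [List.isPrefixOf]; exact fun hx => absurd hx.symm hc
        rw [if_neg (by simp [hpre])]
        simp only [List.length_cons] at hf
        rw [ih r (c :: cur) acc (by omega)]
        cases hr : pvSplit r with
        | nil => exact absurd hr (pvSplit_ne_nil r)
        | cons p ps => simp [pvSplit, hc, hr, List.modifyHead]

lemma pv_splitOn_eq (cs : List Char) : PySem.Chars.splitOn cs [':'] = pvSplit cs := by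
  unfold PySem.Chars.splitOn
  rw [pv_go_eq (cs.length + 1) cs [] [] (by omega)]
  cases h : pvSplit cs with
  | nil => exact absurd h (pvSplit_ne_nil cs)
  | cons p ps => simp

lemma pvSplit_no_colon (cs : List Char) (h : ':' ∉ cs) : pvSplit cs = [cs] := by
  induction cs with
  | nil => rfl
  | cons c r ih =>
    simp only [List.mem_cons, not_or] at h
    simp [pvSplit, Ne.symm h.1, ih h.2, List.modifyHead]

-- the text after the LAST ':' of cs
def pvAfter : List Char → List Char
  | [] => []
  | c :: r => if ':' ∈ r then pvAfter r else if c = ':' then r else c :: pvAfter r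

lemma pvSplit_last (cs : List Char) (h : ':' ∈ cs) :
    2 ≤ (pvSplit cs).length ∧ (pvSplit cs).getLast? = some (pvAfter cs) := by
  induction cs with
  | nil => simp at h
  | cons c r ih =>
    by_cases hr : ':' ∈ r
    · obtain ⟨h1, h2⟩ := ih hr
      by_cases hc : c = ':'
      · subst hc
        refine ⟨by simp [pvSplit]; omega, ?_⟩
        have hsp : pvSplit (':' :: r) = [] :: pvSplit r := by simp [pvSplit]
        rw [hsp]
        simp only [pvAfter, if_pos hr]
        cases hs : pvSplit r with
        | nil => exact absurd hs (pvSplit_ne_nil r)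
        | cons p ps =>
          rw [List.getLast?_cons_cons]
          rw [hs] at h2
          exact h2
      · constructor
        · simpa [pvSplit, hc] using h1
        · simp only [pvSplit, if_neg hc, pvAfter, if_pos hr]
          cases hs : pvSplit r with
          | nil => exact absurd hs (pvSplit_ne_nil r)
          | cons p ps =>
            rw [hs] at h1 h2
            cases ps with
            | nil => simp at h1
            | cons q qs =>
              simp only [List.modifyHead]
              rw [List.getLast?_cons_cons] at h2 ⊢
              exact h2
    · have hc : c = ':' := by
        rcases List.mem_cons.mp h with h' | h'
        · exact h'.symm
        · exact absurd h' hr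
      subst hc
      have hsp : pvSplit (':' :: r) = [] :: pvSplit r := by simp [pvSplit]
      rw [hsp, pvSplit_no_colon r hr]
      refine ⟨by simp, ?_⟩
      simp [pvAfter, hr]

lemma pvAfter_spec (cs : List Char) (h : ':' ∈ cs) :
    ∃ i, cs[i]? = some ':' ∧ (∀ j, i < j → cs[j]? ≠ some ':') ∧ pvAfter cs = cs.drop (i + 1) := by
  induction cs with
  | nil => simp at h
  | cons c r ih =>
    by_cases hr : ':' ∈ r
    · obtain ⟨i, hi1, hi2, hi3⟩ := ih hr
      refine ⟨i + 1, by simpa using hi1, ?_, ?_⟩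
      · intro j hj
        cases j with
        | zero => omega
        | succ k => simpa using hi2 k (by omega)
      · simpa [pvAfter, hr] using hi3
    · have hc : c = ':' := by
        rcases List.mem_cons.mp h with h' | h'
        · exact h'.symm
        · exact absurd h' hr
      subst hc
      refine ⟨0, by simp, ?_, by simp [pvAfter, hr]⟩
      intro j hj
      cases j with
      | zero => omega
      | succ k =>
        simp only [List.getElem?_cons_succ]
        intro hk
        exact hr (List.mem_of_getElem? hk)

-- the greatest index i < n with cs[i] = ':'
def pvLastIdx (cs : List Char) : Nat → Option Nat
  | 0 => none
  | n + 1 => if cs[n]? = some ':' then some n else pvLastIdx cs n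

lemma pvLastIdx_none (cs : List Char) (n : Nat) (h : pvLastIdx cs n = none) :
    ∀ j, j < n → cs[j]? ≠ some ':' := by
  induction n with
  | zero => omega
  | succ m ih =>
    intro j hj
    simp only [pvLastIdx] at h
    split at h
    · exact absurd h (by simp)
    · rcases Nat.lt_succ_iff_lt_or_eq.mp hj with h' | h'
      · exact ih h j h'
      · subst h'; assumption

lemma pvLastIdx_spec (cs : List Char) (n : Nat) (i : Nat) (h : pvLastIdx cs n = some i) :
    i < n ∧ cs[i]? = some ':' ∧ ∀ j, i < j → j < n → cs[j]? ≠ some ':' := by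
  induction n with
  | zero => simp [pvLastIdx] at h
  | succ m ih =>
    simp only [pvLastIdx] at h
    split at h
    · obtain h' := Option.some.inj h
      subst h'
      refine ⟨by omega, by assumption, ?_⟩
      intro j h1 h2
      omega
    · obtain ⟨h1, h2, h3⟩ := ih h
      refine ⟨by omega, h2, ?_⟩
      intro j hj1 hj2
      rcases Nat.lt_succ_iff_lt_or_eq.mp hj2 with h' | h'
      · exact h3 j hj1 h'
      · subst h'; assumption

lemma pvHexClass_colon : pvHexClass ':' = false := by decide

-- the value pvTry produces once the last colon's position is known
def pvCheckOpt (cs : List Char) : Option Nat → Option String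
  | none => none
  | some i =>
    if 4 ≤ (cs.drop (i + 1)).length ∧ (cs.drop (i + 1)).all pvHexClass
    then some (String.ofList (cs.drop (i + 1)))
    else none

lemma pvTry_eq (cs : List Char) (n : Nat) (hn : n ≤ cs.length) :
    pvTry cs n = pvCheckOpt cs (pvLastIdx cs n) := by
  induction n with
  | zero => simp [pvTry, pvLastIdx, pvCheckOpt]
  | succ m ih =>
    simp only [pvTry, pvLastIdx]
    by_cases hc : cs[m]? = some ':'
    · rw [if_pos hc]
      simp only [pvCheckOpt]
      by_cases hok : 4 ≤ (cs.drop (m + 1)).length ∧ (cs.drop (m + 1)).all pvHexClass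
      · rw [if_pos ⟨hc, hok⟩, if_pos hok]
      · rw [if_neg (by intro hx; exact hok hx.2), if_neg hok]
        rw [ih (by omega)]
        cases hli : pvLastIdx cs m with
        | none => rfl
        | some i =>
          simp only [pvCheckOpt]
          obtain ⟨h1, h2, h3⟩ := pvLastIdx_spec cs m i hli
          have hmem : ':' ∈ cs.drop (i + 1) := by
            have : (cs.drop (i + 1))[m - (i + 1)]? = cs[m]? := by
              rw [List.getElem?_drop]
              congr 1
              omega
            exact List.mem_of_getElem? (by rw [this]; exact hc)
          have hall : (cs.drop (i + 1)).all pvHexClass = false := by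
            rcases Bool.eq_false_or_eq_true ((cs.drop (i + 1)).all pvHexClass) with hx | hx
            · exfalso
              have := List.all_eq_true.mp hx ':' hmem
              rw [pvHexClass_colon] at this
              exact absurd this (by simp)
            · exact hx
          simp [hall]
    · rw [if_neg (by intro hx; exact hc hx.1), if_neg hc]
      exact ih (by omega)

lemma pv_pyGet_neg_one {α : Type} (l : List α) (h : l ≠ []) :
    PySem.List.pyGet? l (-1) = l.getLast? := by
  have hl : 1 ≤ l.length := List.length_pos_iff.mpr h
  simp only [PySem.List.pyGet?, PySem.List.pyIdx?]
  rw [if_neg (by omega), if_pos (by omega)]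
  simp only [Option.bind_some]
  rw [List.getLast?_eq_getElem?]
  norm_num

-- ===== VERDICT (by name: the statement is the Claim_ definition above) =====
theorem extract_stable_identifier_py_spec : Claim_equal_extract_stable_identifier_py := by
  intro s _
  unfold Spec_extract_stable_identifier_py extract_stable_identifier_py extract_stable_identifier_py_alt
  have hsplit : PySem.Str.split? s ":" = some ((pvSplit s.toList).map String.ofList) := by
    unfold PySem.Str.split? PySem.Chars.split?
    rw [if_neg (by simp)]
    simp [pv_splitOn_eq]
  simp only [hsplit]
  by_cases hmem : ':' ∈ s.toList
  · -- there is a colon: both sides look at the suffix after the last one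
    have hs : ¬ s = "" := by
      intro h; subst h; simp at hmem
    rw [if_neg hs]
    obtain ⟨hlen2, hlast⟩ := pvSplit_last s.toList hmem
    obtain ⟨i, hi1, hi2, hi3⟩ := pvAfter_spec s.toList hmem
    have hne : (pvSplit s.toList).map String.ofList ≠ [] := by
      simp [pvSplit_ne_nil]
    rw [if_pos (by simpa using hlen2)]
    simp only [pv_pyGet_neg_one _ hne, List.getLast?_map, hlast]
    -- B's side: the last index below length is i
    have hilt : i < s.toList.length := by
      by_contra hge
      rw [List.getElem?_eq_none_iff.2 (by omega)] at hi1
      exact absurd hi1 (by simp)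
    have hlidx : pvLastIdx s.toList s.toList.length = some i := by
      cases hli : pvLastIdx s.toList s.toList.length with
      | none => exact absurd hi1 (pvLastIdx_none _ _ hli i hilt)
      | some i' =>
        obtain ⟨h1, h2, h3⟩ := pvLastIdx_spec _ _ _ hli
        have : i' = i := by
          rcases Nat.lt_trichotomy i' i with h' | h' | h'
          · exact absurd hi1 (h3 i h' hilt)
          · exact h'
          · exact absurd h2 (hi2 i' h')
        rw [this]
    rw [pvTry_eq _ _ (le_refl _), hlidx]
    simp only [pvCheckOpt]
    -- now both sides test the same tail with the same predicate
    simp only [Option.map_some, hi3]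
    set t := s.toList.drop (i + 1) with ht
    have hcheck : (4 ≤ PySem.Str.len (String.ofList t) ∧
        (PySem.Str.lower (String.ofList t)).toList.all
          (fun c => PySem.Chars.isIn [c] "0123456789abcdef".toList))
        ↔ (4 ≤ t.length ∧ t.all pvHexClass) := by
      have e1 : PySem.Str.len (String.ofList t) = (t.length : Int) := by
        simp [PySem.Str.len]
      have e2 : (PySem.Str.lower (String.ofList t)).toList.all
          (fun c => PySem.Chars.isIn [c] "0123456789abcdef".toList) = t.all pvHexClass := by
        simp only [PySem.Str.lower, String.toList_ofList, PySem.Chars.lower, List.all_map]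
        refine List.all_congr rfl ?_
        intro c
        simp only [Function.comp_apply, pv_isIn_single, pv_hex_char]
      rw [e1, e2]
      constructor
      · intro hx; exact ⟨by exact_mod_cast hx.1, hx.2⟩
      · intro hx; exact ⟨by exact_mod_cast hx.1, hx.2⟩
    by_cases hok : 4 ≤ t.length ∧ t.all pvHexClass
    · rw [if_pos (hcheck.2 hok), if_pos hok]
    · rw [if_neg (fun hx => hok (hcheck.1 hx)), if_neg hok]
  · -- no colon: both sides return none
    have hB : pvTry s.toList s.toList.length = none := by
      rw [pvTry_eq _ _ (le_refl _)]
      cases hli : pvLastIdx s.toList s.toList.length with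
      | none => rfl
      | some i =>
        obtain ⟨h1, h2, h3⟩ := pvLastIdx_spec _ _ _ hli
        exact absurd (List.mem_of_getElem? h2) hmem
    rw [hB]
    by_cases hs : s = ""
    · rw [if_pos hs]
    · rw [if_neg hs, pvSplit_no_colon _ hmem]
      simp
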